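-- pv_equiv track=rewrite | github.com/pypi-data/pypi-mirror-381 | packages/nomad-simulations/nomad_simulations-0.5.0.tar.gz/nomad_simulations-0.5.0/src/nomad_simulations/schema_packages/utils/utils.py | get_composition
-- ===== SOURCE A (Python) =====
-- from collections import Counter
--
-- def get_composition(children_names: list[str]) -> str | None:
--     """
--     Build a canonical composition string like ``X(m)Y(n)`` from child names.
--
--     Notes
--     -----
--     - Names are **counted case-sensitively** (``"A"`` and ``"a"`` are distinct).
--     - Output terms are ordered by a **case-insensitive** primary sort
--       (using ``str.casefold()``), with a **deterministic tie-breaker** on the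
--       original string (i.e., sorted by ``(name.casefold(), name)``).
--       This makes the result independent of the input order while preserving
--       distinct case variants as separate terms.
--     - All items are converted to strings via ``str(...)`` before counting.
--     - Returns ``None`` if the input list is empty.
--
--     Parameters
--     ----------
--     children_names : list[str]
--         Child names to count.
--
--     Returns
--     -------
--     str | None
--         Canonical composition string, or ``None`` if no names were provided.
--
--     Examples
--     --------
--     >>> get_composition(['H', 'O', 'H'])
--     'H(2)O(1)'
--     >>> get_composition(['a', 'A', 'b'])
--     'A(1)a(1)b(1)'
--     """
--     if not children_names:
--         return None
--
--     counts = Counter(map(str, children_names))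
--     parts = [
--         f'{name}({counts[name]})'
--         for name in sorted(counts, key=lambda s: (s.casefold(), s))
--     ]
--     return ''.join(parts) if parts else None
-- ===== SOURCE B (Python) =====
-- def get_composition(children_names: list[str]) -> str | None:
--     # Sort all names up front by (casefold, name), then run-length encode
--     # consecutive equal names in a single pass (no Counter / dict).
--     names = sorted(map(str, children_names), key=lambda s: (s.casefold(), s))
--     if not names:
--         return None
--     parts = []
--     run_name, run_count = names[0], 1
--     for name in names[1:]:
--         if name == run_name:
--             run_count += 1
--         else:
--             parts.append(f'{run_name}({run_count})')
--             run_name, run_count = name, 1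
--     parts.append(f'{run_name}({run_count})')
--     return ''.join(parts)
-- ===== Notes on version B (the rewrite author's own statement) =====
-- stated objective: alternative
-- what changed: Replaces the Counter-then-sort-keys pipeline by sorting the whole name list once and run-length encoding consecutive equal names in a single pass; no dict/Counter is built.
import Mathlib
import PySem

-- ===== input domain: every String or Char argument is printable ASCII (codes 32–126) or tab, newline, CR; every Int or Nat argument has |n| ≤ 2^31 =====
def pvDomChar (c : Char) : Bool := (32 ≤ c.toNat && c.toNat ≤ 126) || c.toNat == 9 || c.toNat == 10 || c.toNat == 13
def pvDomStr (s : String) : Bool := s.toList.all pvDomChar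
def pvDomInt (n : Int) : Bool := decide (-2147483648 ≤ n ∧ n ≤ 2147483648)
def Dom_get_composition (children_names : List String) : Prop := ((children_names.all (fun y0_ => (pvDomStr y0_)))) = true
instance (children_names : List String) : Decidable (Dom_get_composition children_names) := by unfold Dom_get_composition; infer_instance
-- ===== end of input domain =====

-- B replaces A's Counter-then-sort-keys pipeline by one sort of the whole list followed by a
-- single run-length-encoding pass (objective: alternative decomposition, similar cost).

-- ===== PORT A =====
-- Port notes: str(...) on a str is the identity, so map(str, children_names) is children_names;
-- s.casefold() is ported as PySem.Str.lower, exact on the ASCII strings of Dom_get_composition;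
-- Counter is PySem.Dict.counter and Counter.__getitem__ is getD _ 0; the f-string is ''.join of
-- its pieces (PySem.Str.join, exact).
def get_composition (children_names : List String) : Option String :=
  if children_names = [] then none
  else
    let counts := PySem.Dict.counter children_names
    let parts := (PySem.List.sorted2 counts.keys (fun s => PySem.Str.lower s) (fun s => s) false).map
      (fun name => PySem.Str.join "" [name, "(", PySem.Int.toStr (counts.getD name 0), ")"])
    if parts ≠ [] then some (PySem.Str.join "" parts) else none

-- ===== PORT B =====
-- the for-loop of Source B: current run (runName, runCount), emit a part when the run ends
def getCompBLoop (runName : String) (runCount : Int) : List String → List String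
  | [] => [PySem.Str.join "" [runName, "(", PySem.Int.toStr runCount, ")"]]
  | y :: ys =>
    if y = runName then getCompBLoop runName (runCount + 1) ys
    else PySem.Str.join "" [runName, "(", PySem.Int.toStr runCount, ")"] :: getCompBLoop y 1 ys

def get_composition_alt (children_names : List String) : Option String :=
  match PySem.List.sorted2 children_names (fun s => PySem.Str.lower s) (fun s => s) false with
  | [] => none
  | x :: rest => some (PySem.Str.join "" (getCompBLoop x 1 rest))

-- ===== PRECONDITION & SPEC =====
def Spec_get_composition (children_names : List String) (out : Option String) : Prop := out = get_composition_alt children_names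
instance (children_names : List String) (out : Option String) : Decidable (Spec_get_composition children_names out) := by unfold Spec_get_composition; infer_instance

-- ===== CLAIM (what is proved, stated in full; the proofs are below) =====
def Claim_equal_get_composition : Prop := ∀ (children_names : List String), Dom_get_composition children_names → Spec_get_composition children_names (get_composition children_names)

-- ===== LEMMAS AND PROOFS =====

-- the total order "(s.casefold(), s) ≤ (t.casefold(), t)" that both sorts realise
def pvLe (a b : String) : Prop :=
  PySem.Str.lower a < PySem.Str.lower b ∨ (PySem.Str.lower a = PySem.Str.lower b ∧ a ≤ b)

def pvBefore (a b : String) : Bool :=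
  decide (PySem.Str.lower a < PySem.Str.lower b) ||
    (!decide (PySem.Str.lower b < PySem.Str.lower a) && decide (a < b))

def pvFmt (v : String) (n : Int) : String := PySem.Str.join "" [v, "(", PySem.Int.toStr n, ")"]

def pvRunsFmt : List String → List String
  | [] => []
  | x :: xs => getCompBLoop x 1 xs

lemma pvLe_refl (a : String) : pvLe a a := Or.inr ⟨rfl, le_refl a⟩

lemma pvLe_antisymm {a b : String} (h1 : pvLe a b) (h2 : pvLe b a) : a = b := by
  rcases h1 with h1 | ⟨e1, h1⟩ <;> rcases h2 with h2 | ⟨e2, h2⟩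
  · exact absurd h2 (lt_asymm h1)
  · exact absurd h1 (e2 ▸ lt_irrefl _)
  · exact absurd h2 (e1 ▸ lt_irrefl _)
  · exact le_antisymm h1 h2

lemma pvLe_trans {a b c : String} (h1 : pvLe a b) (h2 : pvLe b c) : pvLe a c := by
  rcases h1 with h1 | ⟨e1, h1⟩ <;> rcases h2 with h2 | ⟨e2, h2⟩
  · exact Or.inl (lt_trans h1 h2)
  · exact Or.inl (e2 ▸ h1)
  · exact Or.inl (e1 ▸ h2)
  · exact Or.inr ⟨e1.trans e2, le_trans h1 h2⟩

lemma pvLe_of_before_true {a b : String} (h : pvBefore a b = true) : pvLe a b := by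
  unfold pvBefore at h
  simp only [Bool.or_eq_true, Bool.and_eq_true, Bool.not_eq_true', decide_eq_true_eq,
    decide_eq_false_iff_not] at h
  rcases h with h | ⟨h1, h2⟩
  · exact Or.inl h
  · rcases lt_or_eq_of_le (not_lt.mp h1) with hlt | heq
    · exact Or.inl hlt
    · exact Or.inr ⟨heq, le_of_lt h2⟩

lemma pvLe_of_before_false {a b : String} (h : pvBefore a b = false) : pvLe b a := by
  unfold pvBefore at h
  simp only [Bool.or_eq_false_iff, Bool.and_eq_false_iff, Bool.not_eq_false',
    decide_eq_false_iff_not, decide_eq_true_eq] at h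
  obtain ⟨h1, h2⟩ := h
  rcases h2 with h2 | h2
  · exact Or.inl h2
  · rcases lt_or_eq_of_le (not_lt.mp h1) with hlt | heq
    · exact Or.inl hlt
    · exact Or.inr ⟨heq, not_lt.mp h2⟩

lemma pairwise_insertBy (x : String) (l : List String) (h : l.Pairwise pvLe) :
    (PySem.List.insertBy pvBefore x l).Pairwise pvLe := by
  induction l with
  | nil => simp [PySem.List.insertBy]
  | cons y ys ih =>
    rw [List.pairwise_cons] at h
    obtain ⟨hy, hys⟩ := h
    by_cases hb : pvBefore x y = true
    · rw [PySem.List.insertBy, if_pos hb, List.pairwise_cons]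
      refine ⟨?_, List.pairwise_cons.mpr ⟨hy, hys⟩⟩
      intro z hz
      rcases List.mem_cons.mp hz with rfl | hz
      · exact pvLe_of_before_true hb
      · exact pvLe_trans (pvLe_of_before_true hb) (hy z hz)
    · rw [PySem.List.insertBy, if_neg hb, List.pairwise_cons]
      refine ⟨?_, ih hys⟩
      intro z hz
      rcases (PySem.List.mem_insertBy _ _ _ _).mp hz with rfl | hz
      · exact pvLe_of_before_false (Bool.eq_false_iff.mpr hb)
      · exact hy z hz

lemma pairwise_foldl_insertBy (xs init : List String) (h : init.Pairwise pvLe) :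
    (xs.foldl (fun acc x => PySem.List.insertBy pvBefore x acc) init).Pairwise pvLe := by
  induction xs generalizing init with
  | nil => exact h
  | cons x xs ih => exact ih _ (pairwise_insertBy x init h)

lemma sorted2_eq_foldl (xs : List String) :
    PySem.List.sorted2 xs (fun s => PySem.Str.lower s) (fun s => s) false =
      xs.foldl (fun acc x => PySem.List.insertBy pvBefore x acc) [] := rfl

lemma pairwise_sorted2 (xs : List String) :
    (PySem.List.sorted2 xs (fun s => PySem.Str.lower s) (fun s => s) false).Pairwise pvLe := by
  rw [sorted2_eq_foldl]; exact pairwise_foldl_insertBy xs [] (by simp)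

lemma pairwise_flatMap_replicate (ds : List String) (c : String → Nat) (h : ds.Pairwise pvLe) :
    (ds.flatMap fun v => List.replicate (c v) v).Pairwise pvLe := by
  induction ds with
  | nil => simp
  | cons v ds ih =>
    rw [List.pairwise_cons] at h
    obtain ⟨hv, hds⟩ := h
    rw [List.flatMap_cons, List.pairwise_append]
    refine ⟨List.pairwise_replicate.mpr (Or.inr (pvLe_refl v)), ih hds, ?_⟩
    intro a ha b hb
    obtain rfl := List.eq_of_mem_replicate ha
    obtain ⟨w, hw, hbw⟩ := List.mem_flatMap.mp hb
    obtain rfl := List.eq_of_mem_replicate hbw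
    exact hv _ hw

lemma count_flatMap_replicate (ds : List String) (c : String → Nat) (hd : ds.Nodup) (a : String) :
    (ds.flatMap fun v => List.replicate (c v) v).count a = if a ∈ ds then c a else 0 := by
  induction ds with
  | nil => simp
  | cons v ds ih =>
    rw [List.nodup_cons] at hd
    rw [List.flatMap_cons, List.count_append, List.count_replicate, ih hd.2]
    by_cases hav : v = a
    · subst hav
      simp [hd.1]
    · simp [hav, Ne.symm hav, List.mem_cons]

lemma perm_flatMap_count (xs : List String) :
    ((PySem.List.sorted2 (PySem.Set.ofList xs) (fun s => PySem.Str.lower s) (fun s => s)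
        false).flatMap fun v => List.replicate (xs.count v) v).Perm xs := by
  have hperm := PySem.List.sorted2_perm (PySem.Set.ofList xs)
    (fun s => PySem.Str.lower s) (fun s => s) false
  have hnd : (PySem.List.sorted2 (PySem.Set.ofList xs) (fun s => PySem.Str.lower s)
      (fun s => s) false).Nodup := hperm.nodup_iff.mpr (PySem.Set.nodup_ofList xs)
  rw [List.perm_iff_count]
  intro a
  rw [count_flatMap_replicate _ _ hnd a]
  by_cases ha : a ∈ xs
  · rw [if_pos (hperm.mem_iff.mpr ((PySem.Set.mem_ofList xs a).mpr ha))]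
  · rw [if_neg (fun h => ha ((PySem.Set.mem_ofList xs a).mp (hperm.mem_iff.mp h)))]
    exact (List.count_eq_zero.mpr ha).symm

-- the key structural fact: the sorted full list is the sorted distinct names, each repeated count times
lemma sorted2_eq_flatMap (xs : List String) :
    PySem.List.sorted2 xs (fun s => PySem.Str.lower s) (fun s => s) false =
      (PySem.List.sorted2 (PySem.Set.ofList xs) (fun s => PySem.Str.lower s) (fun s => s)
        false).flatMap fun v => List.replicate (xs.count v) v := by
  refine List.Perm.eq_of_pairwise (fun a b _ _ h1 h2 => pvLe_antisymm h1 h2)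
    (pairwise_sorted2 xs) (pairwise_flatMap_replicate _ _ (pairwise_sorted2 _)) ?_
  exact (PySem.List.sorted2_perm xs _ _ false).trans (perm_flatMap_count xs).symm

lemma bLoop_replicate (x : String) (n : Int) (m : Nat) (rest : List String) :
    getCompBLoop x n (List.replicate m x ++ rest) = getCompBLoop x (n + m) rest := by
  induction m generalizing n with
  | zero => simp
  | succ m ih =>
    rw [List.replicate_succ, List.cons_append, getCompBLoop, if_pos rfl, ih]
    congr 1
    push_cast
    ring

lemma bLoop_break (x : String) (n : Int) (rest : List String) (h : ∀ z ∈ rest, z ≠ x) :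
    getCompBLoop x n rest = pvFmt x n :: pvRunsFmt rest := by
  cases rest with
  | nil => rfl
  | cons y ys => rw [getCompBLoop, if_neg (h y (List.mem_cons_self))]; rfl

lemma runsFmt_flatMap (ds : List String) (c : String → Nat) (hd : ds.Nodup)
    (hc : ∀ v ∈ ds, 0 < c v) :
    pvRunsFmt (ds.flatMap fun v => List.replicate (c v) v) =
      ds.map fun v => pvFmt v (c v) := by
  induction ds with
  | nil => rfl
  | cons v ds ih =>
    rw [List.nodup_cons] at hd
    obtain ⟨m, hm⟩ : ∃ m, c v = m + 1 :=
      ⟨c v - 1, (Nat.succ_pred_eq_of_pos (hc v List.mem_cons_self)).symm⟩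
    rw [List.flatMap_cons, hm, List.replicate_succ, List.cons_append]
    show getCompBLoop v 1 (List.replicate m v ++ _) = _
    rw [bLoop_replicate, bLoop_break _ _ _ ?hne]
    case hne =>
      intro z hz
      obtain ⟨w, hw, hzw⟩ := List.mem_flatMap.mp hz
      obtain rfl := List.eq_of_mem_replicate hzw
      exact fun hzv => hd.1 (hzv ▸ hw)
    rw [ih hd.2 (fun w hw => hc w (List.mem_cons_of_mem v hw)), List.map_cons, hm]
    congr 2
    push_cast
    ring

lemma sorted2_ne_nil (xs : List String) (h : xs ≠ []) :
    PySem.List.sorted2 (PySem.Set.ofList xs) (fun s => PySem.Str.lower s) (fun s => s)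
      false ≠ [] := by
  intro hnil
  obtain ⟨a, ha⟩ := List.exists_mem_of_ne_nil xs h
  have := (PySem.List.sorted2_perm (PySem.Set.ofList xs)
    (fun s => PySem.Str.lower s) (fun s => s) false).mem_iff.mpr
    ((PySem.Set.mem_ofList xs a).mpr ha)
  rw [hnil] at this
  exact absurd this (List.not_mem_nil)

-- ===== VERDICT (by name: the statement is the Claim_ definition above) =====
theorem get_composition_spec : Claim_equal_get_composition := by
  unfold Claim_equal_get_composition
  intro xs _
  unfold Spec_get_composition
  by_cases hxs : xs = []
  · subst hxs; rfl
  · set ds := PySem.List.sorted2 (PySem.Set.ofList xs)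
      (fun s => PySem.Str.lower s) (fun s => s) false with hds
    have hdnil : ds ≠ [] := sorted2_ne_nil xs hxs
    have hnd : ds.Nodup :=
      (PySem.List.sorted2_perm _ _ _ false).nodup_iff.mpr (PySem.Set.nodup_ofList xs)
    have hcpos : ∀ v ∈ ds, 0 < xs.count v := by
      intro v hv
      exact List.count_pos_iff.mpr
        ((PySem.Set.mem_ofList xs v).mp ((PySem.List.sorted2_perm _ _ _ false).mem_iff.mp hv))
    -- A's value
    have hA : get_composition xs =
        some (PySem.Str.join "" (ds.map fun v => pvFmt v (xs.count v))) := by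
      rw [get_composition, if_neg hxs]
      simp only [PySem.Dict.keys_counter, PySem.Dict.getD_counter, ← hds]
      rw [if_pos]
      · rfl
      · simp [hdnil]
    -- B's value
    have hB : get_composition_alt xs =
        some (PySem.Str.join "" (pvRunsFmt
          (PySem.List.sorted2 xs (fun s => PySem.Str.lower s) (fun s => s) false))) := by
      rw [get_composition_alt]
      rcases hsx : PySem.List.sorted2 xs (fun s => PySem.Str.lower s) (fun s => s) false with
        _ | ⟨x, rest⟩
      · exfalso
        have hp := PySem.List.sorted2_perm xs (fun s => PySem.Str.lower s) (fun s => s) false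
        rw [hsx] at hp
        exact hxs hp.symm.eq_nil
      · rfl
    rw [hA, hB, sorted2_eq_flatMap, ← hds, runsFmt_flatMap ds _ hnd hcpos]
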